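-- pv_equiv track=rewrite | github.com/Cho-El/Python-coding-test-practice | 프로그래머스 문제/파이썬/2022 SK T-Work/2.py | solution
-- ===== SOURCE A (Python) =====
-- def vip_check(pe, pa): # vip 여부 확인
--
--     if 24 <= pe < 60:
--         if sum(pa) >= 900000:
--             return 1
--         else:
--             return 0
--
--     elif pe >= 60:
--         if sum(pa) >= 600000:
--             return 1
--         else:
--             return 0
--
--     else:
--         return 0
--
-- def solution(periods, payments, estimates):
--     answer = [0,0]
--     check = 1
--     this_month_customer_vip = []
--     next_month_customer_vip = []
--
--     # 이번 달 vip 여부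
--     for pe, pa in zip(periods, payments):
--         this_month_customer_vip.append(vip_check(pe, pa))
--
--     # 다음 달 vip 여부
--     for pe, pa, es in zip(periods, payments, estimates):
--         temp = pa[1:len(pa)] + [es]
--         next_month_customer_vip.append(vip_check(pe + 1, temp))
--
--     for tv, nv in zip(this_month_customer_vip, next_month_customer_vip):
--         if tv == 0 and nv == 1:
--             answer[0] += 1
--         elif tv == 1 and nv == 0:
--             answer[1] += 1
--
--     return answer
-- ===== SOURCE B (Python) =====
-- def solution(periods, payments, estimates):
--     gained = 0
--     lost = 0
--     for pe, pa, es in zip(periods, payments, estimates):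
--         s = sum(pa)
--         cur = (24 <= pe < 60 and s >= 900000) or (pe >= 60 and s >= 600000)
--         s2 = s - (pa[0] if pa else 0) + es
--         pe2 = pe + 1
--         nxt = (24 <= pe2 < 60 and s2 >= 900000) or (pe2 >= 60 and s2 >= 600000)
--         if not cur and nxt:
--             gained += 1
--         elif cur and not nxt:
--             lost += 1
--     return [gained, lost]
-- ===== Notes on version B (the rewrite author's own statement) =====
-- stated objective: simpler
-- what changed: B fuses A's three loops (two VIP-flag list builds plus a comparison pass) into one pass over zip(periods,payments,estimates) with two counters, computes sum(pa) once per customer and derives next month's total arithmetically (s - first payment + estimate) instead of building pa[1:]+[es], and inlines the threshold test as a boolean expression instead of the vip_check helper.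
import Mathlib
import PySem

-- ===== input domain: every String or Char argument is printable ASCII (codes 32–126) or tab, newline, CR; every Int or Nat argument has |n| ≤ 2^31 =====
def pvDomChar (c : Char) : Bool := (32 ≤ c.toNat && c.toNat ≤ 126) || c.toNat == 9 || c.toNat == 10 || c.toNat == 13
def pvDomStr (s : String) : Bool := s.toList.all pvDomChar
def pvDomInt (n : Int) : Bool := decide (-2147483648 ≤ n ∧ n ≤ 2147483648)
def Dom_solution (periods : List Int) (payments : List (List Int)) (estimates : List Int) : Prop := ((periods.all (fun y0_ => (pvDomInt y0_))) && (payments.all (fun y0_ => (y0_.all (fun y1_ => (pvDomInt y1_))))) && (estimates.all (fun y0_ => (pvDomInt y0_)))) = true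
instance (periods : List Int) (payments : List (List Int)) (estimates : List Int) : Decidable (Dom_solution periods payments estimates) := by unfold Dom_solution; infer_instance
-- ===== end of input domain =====

-- B fuses A's three passes into one loop with two counters and computes the
-- next-month total arithmetically; same results, simpler structure.

-- ===== PORT A =====
def vipCheck (pe : Int) (pa : List Int) : Int :=
  if 24 ≤ pe ∧ pe < 60 then
    if pa.sum ≥ 900000 then 1 else 0
  else if pe ≥ 60 then
    if pa.sum ≥ 600000 then 1 else 0
  else 0

def solutionStep (ans : Int × Int) (tn : Int × Int) : Int × Int :=
  if tn.1 = 0 ∧ tn.2 = 1 then (ans.1 + 1, ans.2)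
  else if tn.1 = 1 ∧ tn.2 = 0 then (ans.1, ans.2 + 1)
  else ans

def solution (periods : List Int) (payments : List (List Int)) (estimates : List Int) : List Int :=
  let thisMonth := (periods.zip payments).map (fun x => vipCheck x.1 x.2)
  let nextMonth := ((periods.zip payments).zip estimates).map
    (fun x => vipCheck (x.1.1 + 1) (x.1.2.drop 1 ++ [x.2]))
  let ans := (thisMonth.zip nextMonth).foldl solutionStep (0, 0)
  [ans.1, ans.2]

-- ===== PORT B =====
def solutionAltStep (gl : Int × Int) (x : (Int × List Int) × Int) : Int × Int :=
  let pe := x.1.1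
  let pa := x.1.2
  let es := x.2
  let s := pa.sum
  let cur : Bool := decide ((24 ≤ pe ∧ pe < 60 ∧ s ≥ 900000) ∨ (pe ≥ 60 ∧ s ≥ 600000))
  let s2 := s - (match pa with | [] => 0 | h :: _ => h) + es
  let pe2 := pe + 1
  let nxt : Bool := decide ((24 ≤ pe2 ∧ pe2 < 60 ∧ s2 ≥ 900000) ∨ (pe2 ≥ 60 ∧ s2 ≥ 600000))
  if !cur && nxt then (gl.1 + 1, gl.2)
  else if cur && !nxt then (gl.1, gl.2 + 1)
  else gl

def solution_alt (periods : List Int) (payments : List (List Int)) (estimates : List Int) : List Int :=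
  let gl := ((periods.zip payments).zip estimates).foldl solutionAltStep (0, 0)
  [gl.1, gl.2]

-- ===== PRECONDITION & SPEC =====
def Spec_solution (periods : List Int) (payments : List (List Int)) (estimates : List Int) (out : List Int) : Prop := out = solution_alt periods payments estimates
instance (periods : List Int) (payments : List (List Int)) (estimates : List Int) (out : List Int) : Decidable (Spec_solution periods payments estimates out) := by unfold Spec_solution; infer_instance

-- ===== CLAIM (what is proved, stated in full; the proofs are below) =====
def Claim_equal_solution : Prop := ∀ (periods : List Int) (payments : List (List Int)) (estimates : List Int), Dom_solution periods payments estimates → Spec_solution periods payments estimates (solution periods payments estimates)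

-- ===== LEMMAS AND PROOFS =====

theorem vipCheck_eq (pe : Int) (pa : List Int) :
    vipCheck pe pa =
      if (24 ≤ pe ∧ pe < 60 ∧ pa.sum ≥ 900000) ∨ (pe ≥ 60 ∧ pa.sum ≥ 600000) then 1 else 0 := by
  unfold vipCheck
  split_ifs <;> first | rfl | omega

theorem step_agree (ans : Int × Int) (x : (Int × List Int) × Int) :
    solutionStep ans (vipCheck x.1.1 x.1.2, vipCheck (x.1.1 + 1) (x.1.2.drop 1 ++ [x.2]))
      = solutionAltStep ans x := by
  obtain ⟨⟨pe, pa⟩, e⟩ := x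
  cases pa <;>
    simp only [solutionStep, solutionAltStep, vipCheck_eq, List.drop, List.drop_succ_cons,
      List.nil_append, List.sum_cons, List.sum_nil, List.sum_append,
      Bool.and_eq_true, Bool.not_eq_true', decide_eq_true_eq, decide_eq_false_iff_not] <;>
    split_ifs <;> first | rfl | omega

theorem fold_agree (l2 : List (Int × List Int)) (est : List Int) (a : Int × Int) :
    ((l2.map (fun x => vipCheck x.1 x.2)).zip
        ((l2.zip est).map (fun x => vipCheck (x.1.1 + 1) (x.1.2.drop 1 ++ [x.2])))).foldl
        solutionStep a
      = (l2.zip est).foldl solutionAltStep a := by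
  induction l2 generalizing est a with
  | nil => simp
  | cons x l2t ih =>
    cases est with
    | nil => simp
    | cons e et =>
      simp only [List.zip_cons_cons, List.map_cons, List.foldl_cons]
      rw [show solutionStep a (vipCheck x.1 x.2, vipCheck (x.1 + 1) (List.drop 1 x.2 ++ [e]))
          = solutionAltStep a (x, e) from step_agree a (x, e)]
      exact ih et _

-- ===== VERDICT (by name: the statement is the Claim_ definition above) =====
theorem solution_spec : Claim_equal_solution := by
  intro periods payments estimates _
  unfold Spec_solution solution solution_alt
  simp only [fold_agree]
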